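-- pv_equiv track=rewrite | github.com/weiyangzen/awesome_algorithms | Algorithms/数学-组合数学-0553-Bell数/demo.py | bell_triangle
-- ===== SOURCE A (Python) =====
-- from typing import List
--
-- Triangle = List[List[int]]
--
-- def _validate_n_max(n_max: int) -> None:
--     if not isinstance(n_max, int):
--         raise TypeError(f"n_max must be int, got {type(n_max).__name__}")
--     if n_max < 0:
--         raise ValueError("n_max must be non-negative")
--
-- def bell_triangle(n_max: int) -> Triangle:
--     """Construct Bell triangle up to row n_max.
--
--     Recurrence:
--         T[0][0] = 1
--         T[n][0] = T[n-1][n-1]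
--         T[n][k] = T[n][k-1] + T[n-1][k-1]   (1 <= k <= n)
--
--     Bell number is the first element of each row: B_n = T[n][0].
--     """
--     _validate_n_max(n_max)
--
--     triangle: Triangle = [[0] * (n + 1) for n in range(n_max + 1)]
--     triangle[0][0] = 1
--
--     for n in range(1, n_max + 1):
--         triangle[n][0] = triangle[n - 1][n - 1]
--         for k in range(1, n + 1):
--             triangle[n][k] = triangle[n][k - 1] + triangle[n - 1][k - 1]
--
--     return triangle
-- ===== SOURCE B (Python) =====
-- from typing import List
--
-- Triangle = List[List[int]]
--
--
-- def _validate_n_max(n_max: int) -> None: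
--     if not isinstance(n_max, int):
--         raise TypeError(f"n_max must be int, got {type(n_max).__name__}")
--     if n_max < 0:
--         raise ValueError("n_max must be non-negative")
--
--
-- def bell_triangle(n_max: int) -> Triangle:
--     """Bell triangle via the closed form T[n][k] = sum_i C(k,i) * B_{n-k+i}:
--     first Pascal's triangle of binomials, then the Bell numbers by the
--     binomial recurrence B_{m+1} = sum_i C(m,i) * B_i, then every entry
--     directly from that formula (no Aitken-array recurrence at all)."""
--     _validate_n_max(n_max)
--     # Pascal's triangle: C[m][i] = binomial(m, i)
--     C: Triangle = [[1]]
--     for m in range(1, n_max + 1):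
--         prev = C[-1]
--         C.append([1] + [prev[i - 1] + prev[i] for i in range(1, m)] + [1])
--     # Bell numbers B_0 .. B_{n_max}
--     bell = [1]
--     for m in range(n_max):
--         bell.append(sum(c * b for c, b in zip(C[m], bell)))
--     # Each entry from the closed form
--     return [[sum(C[k][i] * bell[n - k + i] for i in range(k + 1))
--              for k in range(n + 1)]
--             for n in range(n_max + 1)]
-- ===== Notes on version B (the rewrite author's own statement) =====
-- stated objective: alternative
-- what changed: Replaces the Aitken-array recurrence (each entry from its left and upper-left neighbours) by the closed form T[n][k] = sum_i C(k,i)*B_{n-k+i}: B precomputes Pascal's triangle and the Bell numbers via the binomial recurrence, then evaluates every entry independently from that formula.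
import Mathlib
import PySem

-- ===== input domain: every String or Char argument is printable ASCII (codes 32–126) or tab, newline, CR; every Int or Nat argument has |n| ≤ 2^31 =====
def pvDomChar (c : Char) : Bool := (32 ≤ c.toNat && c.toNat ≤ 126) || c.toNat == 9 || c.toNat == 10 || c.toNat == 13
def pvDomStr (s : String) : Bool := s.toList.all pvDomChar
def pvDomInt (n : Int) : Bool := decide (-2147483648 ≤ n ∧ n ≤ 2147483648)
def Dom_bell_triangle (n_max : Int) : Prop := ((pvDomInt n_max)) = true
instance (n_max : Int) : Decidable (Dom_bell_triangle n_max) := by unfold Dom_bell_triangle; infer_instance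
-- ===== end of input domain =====

-- B abandons A's Aitken-array recurrence: it precomputes Pascal's triangle and the
-- Bell numbers (binomial recurrence), then evaluates every entry independently from
-- the closed form T[n][k] = sum_i C(k,i) * B_{n-k+i}.

-- ===== PORT A =====
-- tri[i][j] read; exact while 0 ≤ i < len, 0 ≤ j < len(row) (all of A's reads are)
def pyGetD2 (tri : List (List Int)) (i j : Int) : Int :=
  PySem.List.pyGetD (PySem.List.pyGetD tri i []) j 0

-- xs[i] = v ; exact while 0 ≤ i < len (all of A's writes are)
def pySet2 (tri : List (List Int)) (i j : Int) (v : Int) : List (List Int) :=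
  tri.set i.toNat ((PySem.List.pyGetD tri i []).set j.toNat v)

def bell_triangle (n_max : Int) : List (List Int) :=
  let triangle := (PySem.List.pyRange 0 (n_max + 1) 1).map
    (fun n => List.replicate (n + 1).toNat (0 : Int))
  let triangle := pySet2 triangle 0 0 1
  (PySem.List.pyRange 1 (n_max + 1) 1).foldl (fun tri n =>
    let tri := pySet2 tri n 0 (pyGetD2 tri (n - 1) (n - 1))
    (PySem.List.pyRange 1 (n + 1) 1).foldl (fun tri k =>
      pySet2 tri n k (pyGetD2 tri n (k - 1) + pyGetD2 tri (n - 1) (k - 1))) tri) triangle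

-- ===== PORT B =====
-- C = [[1]]; for m in 1..n_max: C.append([1] + [prev[i-1]+prev[i] for i in 1..m-1] + [1])
def pascalRows (n_max : Int) : List (List Int) :=
  (PySem.List.pyRange 1 (n_max + 1) 1).foldl (fun C m =>
    let prev := (PySem.List.pyGet? C (-1)).getD []
    C ++ [[(1 : Int)] ++ (PySem.List.pyRange 1 m 1).map (fun i =>
        PySem.List.pyGetD prev (i - 1) 0 + PySem.List.pyGetD prev i 0) ++ [1]]) [[1]]

-- bell = [1]; for m in range(n_max): bell.append(sum(c*b for c,b in zip(C[m], bell)))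
def bellNums (n_max : Int) (C : List (List Int)) : List Int :=
  (PySem.List.pyRange 0 n_max 1).foldl (fun bell m =>
    bell ++ [(List.zipWith (fun c b => c * b) (PySem.List.pyGetD C m []) bell).foldl
      (fun x y => x + y) 0]) [1]

-- [[sum(C[k][i]*bell[n-k+i] for i in range(k+1)) for k in range(n+1)] for n in range(n_max+1)]
def bell_triangle_alt (n_max : Int) : List (List Int) :=
  let C := pascalRows n_max
  let bell := bellNums n_max C
  (PySem.List.pyRange 0 (n_max + 1) 1).map (fun n =>
    (PySem.List.pyRange 0 (n + 1) 1).map (fun k =>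
      (PySem.List.pyRange 0 (k + 1) 1).foldl (fun s i =>
        s + PySem.List.pyGetD (PySem.List.pyGetD C k []) i 0 *
            PySem.List.pyGetD bell (n - k + i) 0) 0))

-- ===== PRECONDITION & SPEC =====
-- A raises ValueError for negative n_max (B raises there too); those inputs are excluded.
def Pre_bell_triangle (n_max : Int) : Prop := 0 ≤ n_max
instance (n_max : Int) : Decidable (Pre_bell_triangle n_max) := by unfold Pre_bell_triangle; infer_instance
def pvWitness_bell_triangle : Int := (4)

def Spec_bell_triangle (n_max : Int) (out : List (List Int)) : Prop := out = bell_triangle_alt n_max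
instance (n_max : Int) (out : List (List Int)) : Decidable (Spec_bell_triangle n_max out) := by unfold Spec_bell_triangle; infer_instance

-- ===== CLAIM (what is proved, stated in full; the proofs are below) =====
def Claim_equal_bell_triangle : Prop := ∀ (n_max : Int), Dom_bell_triangle n_max → Pre_bell_triangle n_max → Spec_bell_triangle n_max (bell_triangle n_max)

-- ===== LEMMAS AND PROOFS =====

-- prefix-scan: scan a [x1,x2,…] = [a, a+x1, a+x1+x2, …]
def scan (a : Int) : List Int → List Int
  | [] => [a]
  | x :: t => a :: scan (a + x) t

def scanLast (a : Int) : List Int → Int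
  | [] => a
  | x :: t => scanLast (a + x) t

-- reference Bell triangle (Aitken recurrence, matching A)
def bellRow : Nat → List Int
  | 0 => [1]
  | m + 1 => scan ((bellRow m).getLastD 0) (bellRow m)

def bellTri : Nat → List (List Int)
  | 0 => [[1]]
  | m + 1 => bellTri m ++ [bellRow (m + 1)]

theorem scan_length (a : Int) (p : List Int) : (scan a p).length = p.length + 1 := by
  induction p generalizing a with
  | nil => rfl
  | cons x t ih => simp [scan, ih]

theorem scan_ne_nil (a : Int) (p : List Int) : scan a p ≠ [] := by
  cases p <;> simp [scan]

theorem scan_getLastD (a : Int) (p : List Int) : (scan a p).getLastD 0 = scanLast a p := by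
  induction p generalizing a with
  | nil => rfl
  | cons x t ih =>
      simp [scan, scanLast, ← ih (a + x)]
      cases h : scan (a + x) t with
      | nil => exact absurd h (scan_ne_nil _ _)
      | cons y ys => simp

theorem scan_getElem_len (a : Int) (p : List Int) : (scan a p).getD p.length 0 = scanLast a p := by
  induction p generalizing a with
  | nil => rfl
  | cons x t ih => simpa [scan, scanLast] using ih (a + x)

theorem scan_append_singleton (a : Int) (p : List Int) (x : Int) :
    scan a (p ++ [x]) = scan a p ++ [scanLast a p + x] := by
  induction p generalizing a with
  | nil => rfl
  | cons y t ih => simp [scan, scanLast, ih]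


theorem bellRow_length (m : Nat) : (bellRow m).length = m + 1 := by
  induction m with
  | zero => rfl
  | succ m ih => simp [bellRow, scan_length, ih]

theorem bellTri_length (m : Nat) : (bellTri m).length = m + 1 := by
  induction m with
  | zero => rfl
  | succ m ih => simp [bellTri, ih]


theorem bellTri_getD (m i : Nat) (h : i ≤ m) : (bellTri m).getD i [] = bellRow i := by
  induction m with
  | zero => interval_cases i; rfl
  | succ m ih =>
      rcases Nat.lt_or_ge i (m + 1) with hi | hi
      · have hlen : i < (bellTri m).length := by rw [bellTri_length]; omega
        simp [bellTri, List.getD, List.getElem?_append_left hlen]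
        simpa [List.getD, List.getElem?_eq_getElem hlen] using ih (by omega)
      · have : i = m + 1 := by omega
        subst this
        simp [bellTri, List.getD, bellTri_length]

-- ===== B side: Bell numbers, binomial closed form =====

def bellBL : Nat → List Int
  | 0 => [1]
  | m + 1 =>
      let l := bellBL m
      l ++ [∑ i ∈ Finset.range (m + 1), (Nat.choose m i : Int) * l.getD i 0]

def bellB (m : Nat) : Int := (bellBL m).getD m 0

def ent (n k : Nat) : Int := ∑ i ∈ Finset.range (k + 1), (Nat.choose k i : Int) * bellB (n - k + i)

def crow (m : Nat) : List Int := (List.range (m + 1)).map (fun i => (Nat.choose m i : Int))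

theorem bellBL_length (m : Nat) : (bellBL m).length = m + 1 := by
  induction m with
  | zero => rfl
  | succ m ih => simp [bellBL, ih]

theorem bellBL_getD (n i : Nat) (h : i ≤ n) : (bellBL n).getD i 0 = bellB i := by
  induction n with
  | zero => interval_cases i; rfl
  | succ n ih =>
      rcases Nat.lt_or_ge i (n + 1) with hi | hi
      · rw [show bellBL (n + 1) = bellBL n ++ _ from rfl,
            List.getD_append _ _ _ i (by rw [bellBL_length]; omega)]
        exact ih (by omega)
      · have : i = n + 1 := by omega
        subst this
        rfl

theorem bellB_succ (m : Nat) :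
    bellB (m + 1) = ∑ i ∈ Finset.range (m + 1), (Nat.choose m i : Int) * bellB i := by
  show (bellBL (m + 1)).getD (m + 1) 0 = _
  rw [show bellBL (m + 1) = bellBL m ++ _ from rfl,
      List.getD_append_right _ _ _ _ (by rw [bellBL_length])]
  rw [bellBL_length, Nat.sub_self]
  simp only [List.getD_cons_zero]
  exact Finset.sum_congr rfl (fun i hi => by
    rw [bellBL_getD m i (by simpa [Nat.lt_succ_iff] using hi)])

theorem ent_zero (n : Nat) : ent n 0 = bellB n := by
  simp [ent]

theorem ent_diag (n : Nat) : ent n n = bellB (n + 1) := by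
  rw [bellB_succ]
  exact Finset.sum_congr rfl (fun i _ => by rw [Nat.sub_self, Nat.zero_add])

theorem pascal_sum (g : Nat → Int) (k : Nat) :
    ∑ i ∈ Finset.range (k + 2), (Nat.choose (k + 1) i : Int) * g i
      = (∑ i ∈ Finset.range (k + 1), (Nat.choose k i : Int) * g i)
        + ∑ i ∈ Finset.range (k + 1), (Nat.choose k i : Int) * g (i + 1) := by
  rw [Finset.sum_range_succ' (fun i => (Nat.choose (k + 1) i : Int) * g i) (k + 1)]
  have h1 : ∀ i ∈ Finset.range (k + 1),
      (Nat.choose (k + 1) (i + 1) : Int) * g (i + 1)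
        = (Nat.choose k i : Int) * g (i + 1) + (Nat.choose k (i + 1) : Int) * g (i + 1) := by
    intro i _
    rw [Nat.choose_succ_succ]
    push_cast
    ring
  rw [Finset.sum_congr rfl h1, Finset.sum_add_distrib]
  have h2 : (∑ i ∈ Finset.range (k + 1), (Nat.choose k (i + 1) : Int) * g (i + 1))
      + (Nat.choose (k + 1) 0 : Int) * g 0
      = ∑ i ∈ Finset.range (k + 1), (Nat.choose k i : Int) * g i := by
    rw [show (∑ i ∈ Finset.range (k + 1), (Nat.choose k (i + 1) : Int) * g (i + 1))
          + (Nat.choose (k + 1) 0 : Int) * g 0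
        = ∑ i ∈ Finset.range (k + 2), (Nat.choose k i : Int) * g i from by
      rw [Finset.sum_range_succ' (fun i => (Nat.choose k i : Int) * g i) (k + 1)]
      simp]
    rw [Finset.sum_range_succ, Nat.choose_succ_self]
    simp
  linarith [h2]

theorem ent_succ (n k : Nat) (hk : k ≤ n) :
    ent (n + 1) (k + 1) = ent (n + 1) k + ent n k := by
  have hsub : (n + 1) - (k + 1) = n - k := by omega
  have lhs : ent (n + 1) (k + 1)
      = ∑ i ∈ Finset.range (k + 2), (Nat.choose (k + 1) i : Int) * bellB (n - k + i) := by
    unfold ent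
    rw [hsub]
  rw [lhs, pascal_sum (fun i => bellB (n - k + i)) k]
  have r1 : ∑ i ∈ Finset.range (k + 1), (Nat.choose k i : Int) * bellB (n - k + i) = ent n k := rfl
  have r2 : ∑ i ∈ Finset.range (k + 1), (Nat.choose k i : Int) * bellB (n - k + (i + 1))
      = ent (n + 1) k := by
    unfold ent
    exact Finset.sum_congr rfl (fun i _ => by
      rw [show n - k + (i + 1) = (n + 1) - k + i by omega])
  rw [r1, r2]
  ring

theorem scan_map_range' (f g : Nat → Int) :
    ∀ (j s : Nat), (∀ i, s ≤ i → i < s + j → g (i + 1) = g i + f i) →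
    scan (g s) ((List.range' s j).map f) = (List.range' s (j + 1)).map g := by
  intro j
  induction j with
  | zero => intro s _; rfl
  | succ j ih =>
      intro s h
      rw [List.range'_succ, List.map_cons]
      rw [show scan (g s) (f s :: (List.range' (s + 1) j).map f)
            = g s :: scan (g s + f s) ((List.range' (s + 1) j).map f) from rfl]
      rw [show g s + f s = g (s + 1) from by
        rw [← h s (le_refl s) (by omega)]]
      rw [ih (s + 1) (fun i h1 h2 => h i (by omega) (by omega))]
      rw [show List.range' s (j + 1 + 1) = s :: List.range' (s + 1) (j + 1) from List.range'_succ]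
      rfl

theorem bellRow_eq_ent (n : Nat) : bellRow n = (List.range (n + 1)).map (ent n) := by
  induction n with
  | zero =>
      simp [bellRow, List.range_succ, ent_zero]
      rfl
  | succ n ih =>
      have hlast : (bellRow n).getLastD 0 = ent n n := by
        rw [ih, List.range_succ, List.map_append]
        simp
      rw [show bellRow (n + 1) = scan ((bellRow n).getLastD 0) (bellRow n) from rfl,
          hlast, ih]
      have h0 : ent n n = ent (n + 1) 0 := by rw [ent_diag, ent_zero]
      rw [h0, List.range_eq_range']
      rw [scan_map_range' (ent n) (ent (n + 1)) (n + 1) 0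
        (fun i h1 h2 => ent_succ n i (by omega))]
      rw [List.range_eq_range']

theorem bellTri_eq_map (N : Nat) : bellTri N = (List.range (N + 1)).map bellRow := by
  induction N with
  | zero => rfl
  | succ N ih =>
      rw [show bellTri (N + 1) = bellTri N ++ [bellRow (N + 1)] from rfl, ih,
          List.range_succ (n := N + 1), List.map_append]
      rfl

-- ----- port-B loops -----

theorem list_sum_range (f : Nat → Int) (n : Nat) :
    ((List.range n).map f).sum = ∑ i ∈ Finset.range n, f i := by
  induction n with
  | zero => rfl
  | succ n ih => rw [List.range_succ, List.map_append, List.sum_append, Finset.sum_range_succ, ih]; simp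

theorem crow_getD (m i : Nat) (h : i ≤ m) : (crow m).getD i 0 = (Nat.choose m i : Int) := by
  exact PySem.List.getD_map_range _ _ _ _ (by omega)

theorem map_pyRange_one (f : Int → Int) (M : Nat) :
    (PySem.List.pyRange 1 ((M : Int) + 1) 1).map f
      = (List.range M).map (fun k : Nat => f ((k : Int) + 1)) := by
  induction M with
  | zero => rw [PySem.List.pyRange_one_eq_nil (by norm_num)]; rfl
  | succ M ih =>
      rw [show ((M + 1 : Nat) : Int) + 1 = ((M : Int) + 1) + 1 by push_cast; ring,
          PySem.List.pyRange_one_succ_right (by omega), List.map_append, ih,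
          List.range_succ, List.map_append]
      simp

theorem pascal_loop (M : Nat) :
    (PySem.List.pyRange 1 ((M : Int) + 1) 1).foldl (fun C m =>
      let prev := (PySem.List.pyGet? C (-1)).getD []
      C ++ [[(1 : Int)] ++ (PySem.List.pyRange 1 m 1).map (fun i =>
          PySem.List.pyGetD prev (i - 1) 0 + PySem.List.pyGetD prev i 0) ++ [1]]) [[1]]
      = (List.range (M + 1)).map crow := by
  induction M with
  | zero =>
      rw [PySem.List.pyRange_one_eq_nil (by norm_num)]
      simp [crow, List.range_succ]
  | succ M ih =>
      rw [show ((M + 1 : Nat) : Int) + 1 = ((M : Int) + 1) + 1 by push_cast; ring,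
          PySem.List.pyRange_one_succ_right (by omega), List.foldl_append]
      rw [ih]
      simp only [List.foldl_cons, List.foldl_nil]
      have hsplit : (List.range (M + 1)).map crow = (List.range M).map crow ++ [crow M] := by
        rw [List.range_succ, List.map_append]; rfl
      rw [hsplit, PySem.List.pyGet?_neg_one_append_singleton, Option.getD_some]
      have hrow : [(1 : Int)] ++ (PySem.List.pyRange 1 ((M : Int) + 1) 1).map (fun i =>
          PySem.List.pyGetD (crow M) (i - 1) 0 + PySem.List.pyGetD (crow M) i 0) ++ [1]
          = crow (M + 1) := by
        rw [map_pyRange_one _ M]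
        have hmap : (List.range M).map (fun k : Nat =>
            PySem.List.pyGetD (crow M) (((k : Int) + 1) - 1) 0 + PySem.List.pyGetD (crow M) ((k : Int) + 1) 0)
            = (List.range M).map (fun k : Nat => (Nat.choose (M + 1) (k + 1) : Int)) := by
          apply List.map_congr_left
          intro k hk
          have hk' : k < M := List.mem_range.mp hk
          rw [show ((k : Int) + 1) - 1 = ((k : Nat) : Int) by ring,
              show (k : Int) + 1 = (((k + 1 : Nat)) : Int) by push_cast; ring,
              PySem.List.pyGetD_natCast, PySem.List.pyGetD_natCast,
              crow_getD M k (by omega), crow_getD M (k + 1) (by omega),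
              Nat.choose_succ_succ]
          push_cast; ring
        rw [hmap]
        unfold crow
        rw [List.range_succ_eq_map (n := M + 1), List.map_cons]
        rw [List.range_succ (n := M), List.map_append, List.map_append]
        simp [List.map_map, Function.comp,
              Nat.succ_eq_add_one, Nat.choose_self]
      rw [hrow, List.range_succ (n := M + 1), List.map_append, hsplit]
      simp

theorem bell_loop (N : Nat) (M : Nat) (hM : M ≤ N) :
    (PySem.List.pyRange 0 (M : Int) 1).foldl (fun bell m =>
      bell ++ [(List.zipWith (fun c b => c * b)
        (PySem.List.pyGetD ((List.range (N + 1)).map crow) m []) bell).foldl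
        (fun x y => x + y) 0]) [1]
      = (List.range (M + 1)).map bellB := by
  induction M with
  | zero =>
      rw [PySem.List.pyRange_one_eq_nil (by norm_num)]
      simp [List.range_succ]
      rfl
  | succ M ih =>
      rw [show ((M + 1 : Nat) : Int) = (M : Int) + 1 by push_cast; ring,
          PySem.List.pyRange_one_succ_right (by omega), List.foldl_append]
      rw [ih (by omega)]
      simp only [List.foldl_cons, List.foldl_nil]
      rw [PySem.List.pyGetD_natCast, PySem.List.getD_map_range _ _ _ _ (by omega)]
      have hz : List.zipWith (fun c b => c * b) (crow M) ((List.range (M + 1)).map bellB)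
          = (List.range (M + 1)).map (fun i => (Nat.choose M i : Int) * bellB i) := by
        unfold crow
        rw [List.zipWith_map]
        rw [List.zipWith_self]
      rw [hz, ← List.sum_eq_foldl, list_sum_range, ← bellB_succ]
      simp [List.range_succ]

theorem entry_fold (N n k : Nat) (hk : k ≤ n) (hn : n ≤ N) :
    (PySem.List.pyRange 0 ((k : Int) + 1) 1).foldl (fun s i =>
        s + PySem.List.pyGetD (PySem.List.pyGetD ((List.range (N + 1)).map crow) (k : Int) []) i 0 *
            PySem.List.pyGetD ((List.range (N + 1)).map bellB) ((n : Int) - (k : Int) + i) 0) 0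
      = ent n k := by
  rw [PySem.List.pyGetD_natCast, PySem.List.getD_map_range _ _ _ _ (by omega)]
  rw [show ((k : Int) + 1) = ((k + 1 : Nat) : Int) by push_cast; ring,
      PySem.List.pyRange_zero_nat]
  rw [List.foldl_map]
  rw [show (fun (s : Int) (x : Nat) =>
        s + PySem.List.pyGetD (crow k) (x : Int) 0 *
            PySem.List.pyGetD ((List.range (N + 1)).map bellB) ((n : Int) - (k : Int) + (x : Int)) 0)
      = (fun (s : Int) (x : Nat) =>
        s + (fun x => PySem.List.pyGetD (crow k) (x : Int) 0 *
            PySem.List.pyGetD ((List.range (N + 1)).map bellB) ((n : Int) - (k : Int) + (x : Int)) 0) x) from rfl]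
  rw [PySem.List.foldl_add]
  rw [list_sum_range]
  rw [Int.zero_add]
  unfold ent
  apply Finset.sum_congr rfl
  intro i hi
  have hik : i ≤ k := by simpa [Nat.lt_succ_iff] using hi
  beta_reduce
  rw [PySem.List.pyGetD_natCast, crow_getD k i hik]
  rw [show (n : Int) - (k : Int) + (i : Int) = ((n - k + i : Nat) : Int) by omega,
      PySem.List.pyGetD_natCast, PySem.List.getD_map_range _ _ _ _ (by omega)]

theorem alt_eq_bellTri (n : Int) (hn : 0 ≤ n) : bell_triangle_alt n = bellTri n.toNat := by
  obtain ⟨N, rfl⟩ : ∃ N : Nat, n = (N : Int) := ⟨n.toNat, (Int.toNat_of_nonneg hn).symm⟩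
  rw [Int.toNat_natCast]
  simp only [bell_triangle_alt, pascalRows, bellNums]
  rw [pascal_loop N, bell_loop N N le_rfl]
  rw [bellTri_eq_map]
  rw [show ((N : Int) + 1) = ((N + 1 : Nat) : Int) by push_cast; ring,
      PySem.List.pyRange_zero_nat, List.map_map]
  apply List.map_congr_left
  intro m hm
  have hmN : m < N + 1 := List.mem_range.mp hm
  simp only [Function.comp_apply]
  rw [bellRow_eq_ent]
  rw [show ((m : Int) + 1) = ((m + 1 : Nat) : Int) by push_cast; ring,
      PySem.List.pyRange_zero_nat, List.map_map]
  apply List.map_congr_left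
  intro k hk
  have hkm : k < m + 1 := List.mem_range.mp hk
  simp only [Function.comp_apply]
  exact entry_fold N m k (by omega) (by omega)

-- ===== A side =====

-- zero rows s, s+1, …, s+c-1 of the pre-allocated matrix
def zrows (s c : Nat) : List (List Int) :=
  (List.range' s c).map (fun i => List.replicate (i + 1) (0 : Int))

-- the inner fill loop builds one row as a prefix scan
theorem fill_loop (prev : List Int) (a : Int) (j : Nat) (hj : j ≤ prev.length) :
    (PySem.List.pyRange 1 ((j : Int) + 1) 1).foldl
        (fun row k => row.set k.toNat (PySem.List.pyGetD row (k - 1) 0 + PySem.List.pyGetD prev (k - 1) 0))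
        (a :: List.replicate prev.length 0)
      = scan a (prev.take j) ++ List.replicate (prev.length - j) 0 := by
  induction j with
  | zero =>
      rw [PySem.List.pyRange_one_eq_nil (by norm_num)]
      simp [scan]
  | succ j ih =>
      have hj' : j ≤ prev.length := by omega
      have hjp : j < prev.length := by omega
      rw [show ((j + 1 : Nat) : Int) + 1 = ((j : Int) + 1) + 1 by push_cast; ring,
          PySem.List.pyRange_one_succ_right (by omega), List.foldl_append]
      rw [ih hj']
      simp only [List.foldl_cons, List.foldl_nil]
      have htl : (prev.take j).length = j := by simp [hj']
      have hsl : (scan a (prev.take j)).length = j + 1 := by rw [scan_length, htl]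
      have hk1 : ((j : Int) + 1) - 1 = ((j : Nat) : Int) := by ring
      rw [hk1, PySem.List.pyGetD_natCast, PySem.List.pyGetD_natCast,
          List.getD_append _ _ _ j (by omega)]
      have := scan_getElem_len a (prev.take j)
      rw [htl] at this
      rw [this]
      have hidx : (((j : Int)) + 1).toNat = j + 1 := by omega
      rw [hidx, List.set_append]
      rw [if_neg (by omega)]
      have hrep : prev.length - j = (prev.length - (j + 1)) + 1 := by omega
      rw [hrep, List.replicate_succ, hsl]
      have hset : j + 1 - (j + 1) = 0 := by omega
      rw [hset, List.set_cons_zero]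
      rw [List.take_add_one, List.getElem?_eq_getElem hjp]
      simp only [Option.toList_some]
      rw [scan_append_singleton]
      rw [List.getD_eq_getElem _ _ hjp]
      simp

-- the inner fold only touches row n
theorem inner_factor (n : Nat) (hn : 1 ≤ n) (tri : List (List Int)) (h : n < tri.length)
    (ks : List Int) :
    ks.foldl (fun t k => pySet2 t (n : Int) k (pyGetD2 t (n : Int) (k - 1) + pyGetD2 t ((n : Int) - 1) (k - 1))) tri
      = tri.set n (ks.foldl
          (fun row k => row.set k.toNat (PySem.List.pyGetD row (k - 1) 0 + PySem.List.pyGetD (tri.getD (n - 1) []) (k - 1) 0))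
          (tri.getD n [])) := by
  induction ks generalizing tri with
  | nil =>
      simp only [List.foldl_nil]
      rw [List.getD_eq_getElem _ _ h, List.set_getElem_self]
  | cons k ks ih =>
      simp only [List.foldl_cons]
      have hcast : ((n : Int)) - 1 = ((n - 1 : Nat) : Int) := by omega
      have hstep : pySet2 tri (n : Int) k (pyGetD2 tri (n : Int) (k - 1) + pyGetD2 tri ((n : Int) - 1) (k - 1))
          = tri.set n ((tri.getD n []).set k.toNat
              (PySem.List.pyGetD (tri.getD n []) (k - 1) 0 + PySem.List.pyGetD (tri.getD (n - 1) []) (k - 1) 0)) := by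
        unfold pySet2 pyGetD2
        rw [hcast, PySem.List.pyGetD_natCast, PySem.List.pyGetD_natCast]
        simp
      rw [hstep]
      set row' := (tri.getD n []).set k.toNat
          (PySem.List.pyGetD (tri.getD n []) (k - 1) 0 + PySem.List.pyGetD (tri.getD (n - 1) []) (k - 1) 0) with hrow
      have h' : n < (tri.set n row').length := by rw [List.length_set]; exact h
      rw [ih (tri.set n row') h']
      have e1 : (tri.set n row').getD (n - 1) [] = tri.getD (n - 1) [] := by
        rw [List.getD_eq_getElem _ _ (by rw [List.length_set]; omega),
            List.getD_eq_getElem _ _ (by omega : n - 1 < tri.length)]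
        exact List.getElem_set_ne (by omega) _
      have e2 : (tri.set n row').getD n [] = row' := by
        rw [List.getD_eq_getElem _ _ h', List.getElem_set_self]
      rw [e1, e2, List.set_set]

theorem bellRow_getD_last (m : Nat) : (bellRow m).getD m 0 = (bellRow m).getLastD 0 := by
  cases m with
  | zero => rfl
  | succ m =>
      have hl : (bellRow m).length = m + 1 := bellRow_length m
      show (scan ((bellRow m).getLastD 0) (bellRow m)).getD (m + 1) 0
          = (scan ((bellRow m).getLastD 0) (bellRow m)).getLastD 0
      rw [scan_getLastD, ← hl, scan_getElem_len]

theorem outer_loop (N m : Nat) (hm : m ≤ N) :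
    (PySem.List.pyRange 1 ((m : Int) + 1) 1).foldl (fun tri n =>
      let tri := pySet2 tri n 0 (pyGetD2 tri (n - 1) (n - 1))
      (PySem.List.pyRange 1 (n + 1) 1).foldl (fun tri k =>
        pySet2 tri n k (pyGetD2 tri n (k - 1) + pyGetD2 tri (n - 1) (k - 1))) tri)
      (bellTri 0 ++ zrows 1 N)
      = bellTri m ++ zrows (m + 1) (N - m) := by
  induction m with
  | zero =>
      rw [PySem.List.pyRange_one_eq_nil (by norm_num)]
      rfl
  | succ m ih =>
      have hm' : m ≤ N := by omega
      rw [show ((m + 1 : Nat) : Int) + 1 = ((m : Int) + 1) + 1 by push_cast; ring,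
          PySem.List.pyRange_one_succ_right (by omega), List.foldl_append]
      rw [ih hm']
      simp only [List.foldl_cons, List.foldl_nil]
      have hl : (bellTri m).length = m + 1 := bellTri_length m
      have hrl : (bellRow m).length = m + 1 := bellRow_length m
      have hz : zrows (m + 1) (N - m)
          = List.replicate (m + 2) 0 :: zrows (m + 2) (N - (m + 1)) := by
        rw [show N - m = (N - (m + 1)) + 1 by omega]
        simp [zrows, List.range'_succ]
      have hTgm : (bellTri m ++ zrows (m + 1) (N - m)).getD m [] = bellRow m := by
        rw [List.getD_append _ _ _ m (by omega), bellTri_getD m m le_rfl]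
      have hv : pyGetD2 (bellTri m ++ zrows (m + 1) (N - m)) ((m : Int) + 1 - 1) ((m : Int) + 1 - 1)
          = (bellRow m).getLastD 0 := by
        rw [show ((m : Int) + 1 - 1) = ((m : Nat) : Int) by ring]
        unfold pyGetD2
        rw [PySem.List.pyGetD_natCast, PySem.List.pyGetD_natCast, hTgm, bellRow_getD_last]
      rw [hv]
      have hT1 : pySet2 (bellTri m ++ zrows (m + 1) (N - m)) ((m : Int) + 1) 0 ((bellRow m).getLastD 0)
          = bellTri m ++ ((bellRow m).getLastD 0 :: List.replicate (m + 1) 0) :: zrows (m + 2) (N - (m + 1)) := by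
        unfold pySet2
        rw [show ((m : Int) + 1) = (((m + 1 : Nat)) : Int) by push_cast; ring,
            PySem.List.pyGetD_natCast, Int.toNat_natCast,
            List.getD_append_right _ _ _ _ (by omega), hl, Nat.sub_self, hz]
        simp [hl, List.replicate_succ]
      rw [hT1]
      have hlen1 : m + 1 < (bellTri m ++ ((bellRow m).getLastD 0 :: List.replicate (m + 1) 0) :: zrows (m + 2) (N - (m + 1))).length := by
        simp [hl]
      have hfac := inner_factor (m + 1) (by omega)
        (bellTri m ++ ((bellRow m).getLastD 0 :: List.replicate (m + 1) 0) :: zrows (m + 2) (N - (m + 1)))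
        hlen1 (PySem.List.pyRange 1 ((m : Int) + 1 + 1) 1)
      rw [show (((m + 1 : Nat)) : Int) = (m : Int) + 1 by push_cast; ring] at hfac
      rw [hfac]
      have eprev : (bellTri m ++ ((bellRow m).getLastD 0 :: List.replicate (m + 1) 0) :: zrows (m + 2) (N - (m + 1))).getD (m + 1 - 1) []
          = bellRow m := by
        rw [show m + 1 - 1 = m by omega, List.getD_append _ _ _ m (by omega), bellTri_getD m m le_rfl]
      have ecur : (bellTri m ++ ((bellRow m).getLastD 0 :: List.replicate (m + 1) 0) :: zrows (m + 2) (N - (m + 1))).getD (m + 1) []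
          = (bellRow m).getLastD 0 :: List.replicate (m + 1) 0 := by
        rw [List.getD_append_right _ _ _ _ (by omega), hl, Nat.sub_self]
        rfl
      rw [eprev, ecur]
      have hfill := fill_loop (bellRow m) ((bellRow m).getLastD 0) (m + 1) (by omega)
      rw [hrl] at hfill
      rw [show (((m + 1 : Nat)) : Int) + 1 = (m : Int) + 1 + 1 by push_cast; ring] at hfill
      rw [hfill, Nat.sub_self, List.replicate_zero, List.append_nil,
          List.take_of_length_le (by omega)]
      have : scan ((bellRow m).getLastD 0) (bellRow m) = bellRow (m + 1) := rfl
      rw [this, List.set_append, if_neg (by omega), hl, Nat.sub_self, List.set_cons_zero]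
      simp [bellTri]

theorem a_eq_bellTri (n : Int) (hn : 0 ≤ n) : bell_triangle n = bellTri n.toNat := by
  obtain ⟨N, rfl⟩ : ∃ N : Nat, n = (N : Int) := ⟨n.toNat, (Int.toNat_of_nonneg hn).symm⟩
  simp only [bell_triangle, Int.toNat_natCast]
  have hinit : (PySem.List.pyRange 0 ((N : Int) + 1) 1).map
      (fun n => List.replicate (n + 1).toNat (0 : Int)) = [(0 : Int)] :: zrows 1 N := by
    rw [show ((N : Int) + 1) = (((N + 1 : Nat)) : Int) by push_cast; ring,
        PySem.List.pyRange_zero_nat, List.map_map, List.range_eq_range', List.range'_succ]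
    simp only [List.map_cons, Function.comp_apply]
    refine congrArg₂ _ rfl ?_
    unfold zrows
    apply List.map_congr_left
    intro i _
    have h1 : ((i : Int) + 1).toNat = i + 1 := by omega
    simp [h1]
  rw [hinit]
  have hset : pySet2 ([(0 : Int)] :: zrows 1 N) 0 0 1 = bellTri 0 ++ zrows 1 N := by
    unfold pySet2
    simp [PySem.List.pyGetD_zero_cons, bellTri]
  rw [hset]
  have hout := outer_loop N N le_rfl
  rw [Nat.sub_self] at hout
  simpa [zrows] using hout

-- ===== VERDICT (by name: the statement is the Claim_ definition above) =====
theorem bell_triangle_spec : Claim_equal_bell_triangle := by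
  intro n hdom hpre
  unfold Spec_bell_triangle
  rw [a_eq_bellTri n hpre, alt_eq_bellTri n hpre]
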